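-- pv_equiv track=rewrite | github.com/Splafty/pp1 | 12-Test3/mock2/p7.py | f
-- ===== SOURCE A (Python) =====
-- def f(d):
--     in_out_count = {}
--     in_park = set()
--
--     for car, action in d:
--         if action == "in":
--             in_out_count[car] = in_out_count.get(car, 0) + 1
--             in_park.add(car)
--         elif action == "out":
--             if car in in_out_count:
--                 in_out_count[car] -= 1
--                 if in_out_count[car] == 0:
--                     in_park.remove(car)
--     return sorted(list(in_park))
-- ===== SOURCE B (Python) =====
-- def f(d):
--     # Index each car's actions in event order, then simulate each car's own history.
--     idx = {}
--     for car, action in d: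
--         idx.setdefault(car, []).append(action)
--     parked = []
--     for car, actions in idx.items():
--         seen = False
--         count = 0
--         p = False
--         for a in actions:
--             if a == "in":
--                 seen = True
--                 count += 1
--                 p = True
--             elif a == "out" and seen:
--                 count -= 1
--                 if count == 0:
--                     p = False
--         if p:
--             parked.append(car)
--     return sorted(parked)
-- ===== Notes on version B (the rewrite author's own statement) =====
-- stated objective: alternative
-- what changed: Replaces A's single global pass maintaining a shared count-dict and parked-set by an index-then-per-car-simulation: one pass groups each car's actions in order, then each car's history is replayed independently with a seen/count/parked state.
import Mathlib
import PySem

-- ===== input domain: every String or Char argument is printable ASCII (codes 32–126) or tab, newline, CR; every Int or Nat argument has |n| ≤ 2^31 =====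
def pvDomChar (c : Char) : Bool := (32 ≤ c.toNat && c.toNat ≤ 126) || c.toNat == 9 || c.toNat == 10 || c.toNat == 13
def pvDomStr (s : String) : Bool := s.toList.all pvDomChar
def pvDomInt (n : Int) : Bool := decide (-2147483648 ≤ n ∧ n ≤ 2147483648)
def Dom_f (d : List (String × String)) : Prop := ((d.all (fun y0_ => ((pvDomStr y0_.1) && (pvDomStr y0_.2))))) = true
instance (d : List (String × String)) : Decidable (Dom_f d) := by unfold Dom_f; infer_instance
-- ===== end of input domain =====

-- B replays each car's own event stream separately instead of A's single global pass; objective: alternative decomposition, same cost.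

-- ===== PORT A =====
-- in_park.remove(car): when a car's count reaches 0 by an 'out', the car is always
-- in the set (count 0 is only reached from a parked state), so discard is exact here.
def stepA (s : PySem.Dict String Int × PySem.Set String) (e : String × String) :
    PySem.Dict String Int × PySem.Set String :=
  if e.2 == "in" then
    (s.1.insert e.1 (s.1.getD e.1 0 + 1), PySem.Set.add s.2 e.1)
  else if e.2 == "out" then
    if s.1.contains e.1 then
      if s.1.getD e.1 0 - 1 == 0 then
        (s.1.insert e.1 (s.1.getD e.1 0 - 1), PySem.Set.discard s.2 e.1)
      else (s.1.insert e.1 (s.1.getD e.1 0 - 1), s.2)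
    else s
  else s

def f (d : List (String × String)) : List String :=
  PySem.List.sorted ((d.foldl stepA (PySem.Dict.empty, PySem.Set.empty)).2) (fun x => x) false

-- ===== PORT B =====
-- per-car state: (seen any 'in', count, parked)
def stepB (t : Bool × Int × Bool) (a : String) : Bool × Int × Bool :=
  if a == "in" then (true, t.2.1 + 1, true)
  else if a == "out" && t.1 then
    (t.1, t.2.1 - 1, if t.2.1 - 1 == 0 then false else t.2.2)
  else t

def f_alt (d : List (String × String)) : List String :=
  PySem.List.sorted
    ((d.foldl
        (fun (m : PySem.Dict String (List String)) e => m.modify e.1 [] (fun l => l ++ [e.2]))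
        PySem.Dict.empty).items.foldl
      (fun acc ca => if (ca.2.foldl stepB (false, 0, false)).2.2 then acc ++ [ca.1] else acc) [])
    (fun x => x) false

-- ===== PRECONDITION & SPEC =====
def Spec_f (d : List (String × String)) (out : List String) : Prop := out = f_alt d
instance (d : List (String × String)) (out : List String) : Decidable (Spec_f d out) := by unfold Spec_f; infer_instance

-- ===== CLAIM (what is proved, stated in full; the proofs are below) =====
def Claim_equal_f : Prop := ∀ (d : List (String × String)), Dom_f d → Spec_f d (f d)

-- ===== LEMMAS AND PROOFS =====


-- the actions of car c in d, in event order
def acts (c : String) (d : List (String × String)) : List String :=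
  (d.filter (fun e => e.1 == c)).map Prod.snd

-- B's per-car simulation result for car c
def simC (c : String) (d : List (String × String)) : Bool × Int × Bool :=
  (acts c d).foldl stepB (false, 0, false)

-- the per-car projection relation between A's global state and B's per-car state
def relP (c : String) (s : PySem.Dict String Int × PySem.Set String)
    (t : Bool × Int × Bool) : Prop :=
  s.1.get? c = (if t.1 then some t.2.1 else none) ∧ (c ∈ s.2 ↔ t.2.2 = true) ∧
    (t.1 = false → t.2.1 = 0)

theorem stepA_get?_ne (s : PySem.Dict String Int × PySem.Set String)
    (e : String × String) (c : String) (h : e.1 ≠ c) :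
    (stepA s e).1.get? c = s.1.get? c := by
  unfold stepA
  split_ifs <;> simp [PySem.Dict.get?_insert_of_ne _ _ (Ne.symm h)]

theorem stepA_mem_ne (s : PySem.Dict String Int × PySem.Set String)
    (e : String × String) (c : String) (h : e.1 ≠ c) :
    (c ∈ (stepA s e).2) ↔ c ∈ s.2 := by
  have h' : c ≠ e.1 := fun hh => h hh.symm
  unfold stepA
  split_ifs <;> simp [PySem.Set.mem_add, PySem.Set.mem_discard, h']

theorem relP_step (c : String) (s : PySem.Dict String Int × PySem.Set String)
    (t : Bool × Int × Bool) (h : relP c s t) (e : String × String) :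
    relP c (stepA s e) (if e.1 == c then stepB t e.2 else t) := by
  obtain ⟨h1, h2, h3⟩ := h
  have hgd : s.1.getD c 0 = (s.1.get? c).getD 0 := by
    simp [PySem.Dict.getD, PySem.Dict.get?]
  have hcont : s.1.contains c = t.1 := by
    rw [PySem.Dict.contains_eq_isSome_get?, h1]
    cases t.1 <;> simp
  by_cases hc : e.1 = c
  · subst hc
    by_cases hin : e.2 = "in"
    · -- 'in': count incremented (h3 makes getD agree when unseen), car parked
      have hval : s.1.getD e.1 0 = t.2.1 := by
        rw [hgd, h1]
        cases ht : t.1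
        · simp [h3 ht]
        · simp
      refine ⟨?_, ?_, ?_⟩ <;>
        simp [stepA, stepB, hin, hval, PySem.Dict.get?_insert_self, PySem.Set.mem_add]
    · by_cases hout : e.2 = "out"
      · cases ht : t.1 with
        | false =>
          -- car never seen: A's dict has no entry, both sides leave the state alone
          have hcf : s.1.contains e.1 = false := by rw [hcont, ht]
          refine ⟨?_, ?_, ?_⟩ <;>
            simp [stepA, stepB, hout, hcf, ht, h1, h2, h3 ht]
        | true =>
          -- car seen: both decrement; parked is cleared exactly when the count hits 0
          have hval : s.1.getD e.1 0 = t.2.1 := by rw [hgd, h1, ht]; simp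
          have hct : s.1.contains e.1 = true := by rw [hcont, ht]
          by_cases hz : t.2.1 - 1 = 0
          · refine ⟨?_, ?_, ?_⟩ <;>
              simp [stepA, stepB, hout, hct, ht, hval, hz,
                PySem.Dict.get?_insert_self, PySem.Set.mem_discard]
          · refine ⟨?_, ?_, ?_⟩ <;>
              simp [stepA, stepB, hout, hct, ht, hval, hz,
                PySem.Dict.get?_insert_self, h2]
      · -- any other action: both sides leave the state alone
        have hid : stepB t e.2 = t := by simp [stepB, hin, hout]
        refine ⟨?_, ?_, ?_⟩ <;>
          simp only [beq_self_eq_true, if_true, hid]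
        · simp [stepA, hin, hout, h1]
        · simp [stepA, hin, hout, h2]
        · exact h3
  · -- event about a different car: A's state projected at c is unchanged
    have hne : (e.1 == c) = false := by simp [hc]
    rw [hne]
    simp only [Bool.false_eq_true, if_false]
    refine ⟨?_, ?_, h3⟩
    · rw [stepA_get?_ne s e c hc]; exact h1
    · rw [stepA_mem_ne s e c hc]; exact h2

theorem relP_foldl (c : String) (d : List (String × String))
    (s : PySem.Dict String Int × PySem.Set String) (t : Bool × Int × Bool)
    (h : relP c s t) :
    relP c (d.foldl stepA s) ((acts c d).foldl stepB t) := by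
  induction d generalizing s t with
  | nil => simpa [acts] using h
  | cons e rest ih =>
    have hstep := relP_step c s t h e
    by_cases hc : e.1 = c
    · have : acts c (e :: rest) = e.2 :: acts c rest := by simp [acts, hc]
      rw [this]
      simpa [hc] using ih _ _ (by simpa [hc] using hstep)
    · have : acts c (e :: rest) = acts c rest := by simp [acts, hc]
      rw [this]
      simpa [hc] using ih _ _ (by simpa [hc] using hstep)

theorem relP_main (c : String) (d : List (String × String)) :
    relP c (d.foldl stepA (PySem.Dict.empty, PySem.Set.empty)) (simC c d) := by
  refine relP_foldl c d _ _ ?_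
  refine ⟨?_, ?_, ?_⟩ <;> simp [PySem.Dict.get?_empty, PySem.Set.empty]

theorem nodup_parkA (d : List (String × String))
    (s : PySem.Dict String Int × PySem.Set String) (hs : s.2.Nodup) :
    (d.foldl stepA s).2.Nodup := by
  induction d generalizing s with
  | nil => simpa using hs
  | cons e rest ih =>
    refine ih _ ?_
    unfold stepA
    split_ifs <;> simp_all [PySem.Set.nodup_add, PySem.Set.nodup_discard]

theorem getD_idx (c : String) (d : List (String × String))
    (m : PySem.Dict String (List String)) :
    (d.foldl (fun (m : PySem.Dict String (List String)) e =>
        m.modify e.1 [] (fun l => l ++ [e.2])) m).getD c [] = m.getD c [] ++ acts c d := by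
  induction d generalizing m with
  | nil => simp [acts]
  | cons e rest ih =>
    by_cases hc : e.1 = c
    · have ha : acts c (e :: rest) = e.2 :: acts c rest := by simp [acts, hc]
      rw [List.foldl_cons, ih, ha, hc, PySem.Dict.getD_modify_self]
      simp
    · have ha : acts c (e :: rest) = acts c rest := by simp [acts, hc]
      rw [List.foldl_cons, ih, ha, PySem.Dict.getD_modify_of_ne]
      exact fun h => hc h.symm

theorem acts_nil_of_not_mem (c : String) (d : List (String × String))
    (h : c ∉ d.map Prod.fst) : acts c d = [] := by
  unfold acts
  rw [List.filter_eq_nil_iff.mpr, List.map_nil]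
  intro e he
  simp only [beq_iff_eq]
  intro hec
  exact h (List.mem_map.mpr ⟨e, he, hec⟩)

theorem simC_mem (c : String) (d : List (String × String))
    (h : (simC c d).2.2 = true) : c ∈ d.map Prod.fst := by
  by_contra hn
  rw [simC, acts_nil_of_not_mem c d hn] at h
  simp at h

theorem f_alt_eq (d : List (String × String)) :
    f_alt d = PySem.List.sorted
      ((PySem.Set.ofList (d.map Prod.fst)).filter (fun k => (simC k d).2.2))
      (fun x => x) false := by
  unfold f_alt
  set idx := d.foldl
    (fun (m : PySem.Dict String (List String)) e => m.modify e.1 [] (fun l => l ++ [e.2]))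
    PySem.Dict.empty with hidx
  have hkeys : idx.keys = PySem.Set.ofList (d.map Prod.fst) := by
    rw [hidx, PySem.Dict.keys_foldl_modify_key d (fun e => e.1) [] (fun _ e l => l ++ [e.2]),
      PySem.Dict.keys_empty, PySem.Set.update_nil_left]
  have hnd : idx.keys.Nodup := by rw [hkeys]; exact PySem.Set.nodup_ofList _
  have hgetD : ∀ k, idx.getD k [] = acts k d := by
    intro k
    rw [hidx, getD_idx, PySem.Dict.getD_empty, List.nil_append]
  rw [PySem.List.foldl_append_if
      (fun ca : String × List String => (ca.2.foldl stepB (false, 0, false)).2.2)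
      (fun ca : String × List String => ca.1) idx.items [],
    PySem.Dict.items_eq_map_keys idx hnd [], List.filter_map, List.map_map]
  rw [hkeys]
  congr 1
  have key : ∀ xs : List String,
      (xs.filter ((fun ca : String × List String => (ca.2.foldl stepB (false, 0, false)).2.2) ∘
        fun k => (k, idx.getD k []))).map
        ((fun ca : String × List String => ca.1) ∘ fun k => (k, idx.getD k [])) =
      xs.filter (fun k => (simC k d).2.2) := by
    intro xs
    induction xs with
    | nil => rfl
    | cons x xs ih =>
      simp only [List.filter_cons, Function.comp_apply, hgetD x]
      by_cases hx : (simC x d).2.2 = true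
      · have hx' : (List.foldl stepB (false, 0, false) (acts x d)).2.2 = true := by
          simpa [simC] using hx
        simp [hx', ih, simC]
      · have hx' : (List.foldl stepB (false, 0, false) (acts x d)).2.2 = false := by
          simpa [simC] using eq_false_of_ne_true hx
        simp [hx', ih, simC]
  rw [List.nil_append]
  exact key _

theorem f_eq (d : List (String × String)) :
    f d = PySem.List.sorted ((d.foldl stepA (PySem.Dict.empty, PySem.Set.empty)).2)
      (fun x => x) false := rfl



-- ===== VERDICT (by name: the statement is the Claim_ definition above) =====

theorem f_spec : Claim_equal_f := by
  intro d _
  unfold Spec_f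
  rw [f_eq, f_alt_eq]
  apply PySem.List.sorted_eq_sorted_of_perm
  · exact fun a b h => h
  · rw [List.perm_ext_iff_of_nodup]
    · intro c
      constructor
      · intro hc
        have hrel := (relP_main c d).2.1
        have hp : (simC c d).2.2 = true := hrel.mp hc
        refine List.mem_filter.mpr ⟨?_, by simpa using hp⟩
        exact (PySem.Set.mem_ofList _ _).mpr (simC_mem c d hp)
      · intro hc
        obtain ⟨_, hp⟩ := List.mem_filter.mp hc
        exact (relP_main c d).2.1.mpr (by simpa using hp)
    · exact nodup_parkA d _ (by simp [PySem.Set.empty])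
    · exact (PySem.Set.nodup_ofList _).filter _
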